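-- pv_equiv track=rewrite | github.com/raincomplex/randomizers | randos/seamless.py | seamless_bag2_pure
-- ===== SOURCE A (Python) =====
-- def seamless_bag2_pure(history):
--     'seamless 14-piece bag'
--     bag = list('jiltsoz'*2)
--     for c in history[-14:]:
--         if c in bag:
--             bag.remove(c)
--     if not bag:
--         bag = list('jiltsoz')
--     return {c: bag.count(c) for c in 'jiltsoz'}
-- ===== SOURCE B (Python) =====
-- def seamless_bag2_pure(history):
--     'seamless 14-piece bag'
--     window = history[-14:]
--     result = {c: max(0, 2 - window.count(c)) for c in 'jiltsoz'}
--     if all(v == 0 for v in result.values()):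
--         result = {c: 1 for c in 'jiltsoz'}
--     return result
-- ===== Notes on version B (the rewrite author's own statement) =====
-- stated objective: simpler
-- what changed: Replaced the mutable two-copy bag with remove-on-match by a closed form per piece: count the last-14 window once and return max(0, 2 - count), with the all-zero case reset to ones.
import Mathlib
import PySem

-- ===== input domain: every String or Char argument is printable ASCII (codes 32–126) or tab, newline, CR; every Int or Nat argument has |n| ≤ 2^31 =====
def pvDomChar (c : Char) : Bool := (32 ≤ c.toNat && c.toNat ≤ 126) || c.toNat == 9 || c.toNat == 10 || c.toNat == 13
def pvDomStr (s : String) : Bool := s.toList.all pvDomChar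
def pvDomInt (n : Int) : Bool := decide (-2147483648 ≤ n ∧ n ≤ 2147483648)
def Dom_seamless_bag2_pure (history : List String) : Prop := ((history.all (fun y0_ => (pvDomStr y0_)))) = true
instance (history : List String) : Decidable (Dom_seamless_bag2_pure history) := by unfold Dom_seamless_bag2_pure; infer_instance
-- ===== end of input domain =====

-- B replaces A's mutable two-copy bag (remove on match, then count) by the closed form
-- 'max(0, 2 - count in last-14 window)' per piece; objective: simpler.

-- the seven pieces, as one-character strings (Python iterates the string 'jiltsoz')
def pvPieces : List String := ["j", "i", "l", "t", "s", "o", "z"]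

-- ===== PORT A =====
def seamless_bag2_pure (history : List String) : List (String × Int) :=
  let bag : List String := pvPieces ++ pvPieces    -- list('jiltsoz'*2)
  let bag : List String :=
    (PySem.List.slice history (some (-14)) none).foldl
      (fun bag c => if c ∈ bag then (PySem.List.remove? bag c).getD bag else bag) bag
  let bag : List String := if bag = [] then pvPieces else bag
  pvPieces.map (fun c => (c, (PySem.List.count bag c : Int)))

-- ===== PORT B =====
def seamless_bag2_pure_alt (history : List String) : List (String × Int) :=
  let window : List String := PySem.List.slice history (some (-14)) none
  let result : List (String × Int) :=
    pvPieces.map (fun c => (c, max 0 (2 - (PySem.List.count window c : Int))))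
  if result.all (fun p => p.2 == 0) then pvPieces.map (fun c => (c, (1 : Int))) else result

-- ===== PRECONDITION & SPEC =====
def Spec_seamless_bag2_pure (history : List String) (out : List (String × Int)) : Prop := out = seamless_bag2_pure_alt history
instance (history : List String) (out : List (String × Int)) : Decidable (Spec_seamless_bag2_pure history out) := by unfold Spec_seamless_bag2_pure; infer_instance

-- ===== CLAIM (what is proved, stated in full; the proofs are below) =====
def Claim_equal_seamless_bag2_pure : Prop := ∀ (history : List String), Dom_seamless_bag2_pure history → Spec_seamless_bag2_pure history (seamless_bag2_pure history)

-- ===== LEMMAS AND PROOFS =====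

-- the bag-removal loop, named for the lemmas below
def pvStep (bag : List String) (c : String) : List String :=
  if c ∈ bag then (PySem.List.remove? bag c).getD bag else bag

lemma pvStep_count (bag : List String) (c x : String) :
    (pvStep bag c).count x = bag.count x - (if c = x then 1 else 0) := by
  unfold pvStep
  by_cases hm : c ∈ bag
  · simp only [hm, if_true, PySem.List.remove?_eq_some_erase bag c hm, Option.getD_some]
    by_cases hcx : c = x
    · subst hcx
      simp [List.count_erase_self]
    · simp [List.count_erase_of_ne (fun h => hcx h.symm), hcx]
  · simp only [hm, if_false]
    by_cases hcx : c = x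
    · subst hcx
      have : bag.count c = 0 := List.count_eq_zero.mpr hm
      simp [this]
    · simp [hcx]

lemma pvFold_count (w : List String) (bag : List String) (x : String) :
    (w.foldl pvStep bag).count x = bag.count x - w.count x := by
  induction w generalizing bag with
  | nil => simp
  | cons c w ih =>
      simp only [List.foldl_cons, ih, pvStep_count, List.count_cons]
      by_cases hcx : c = x <;> simp [hcx] <;> omega

lemma pvFold_subset (w : List String) (bag : List String) :
    ∀ x, x ∈ w.foldl pvStep bag → x ∈ bag := by
  induction w generalizing bag with
  | nil => simp
  | cons c w ih =>
      intro x hx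
      have hx' := ih (pvStep bag c) x hx
      unfold pvStep at hx'
      by_cases hm : c ∈ bag
      · simp only [hm, if_true, PySem.List.remove?_eq_some_erase bag c hm, Option.getD_some] at hx'
        exact List.mem_of_mem_erase hx'
      · simpa [hm] using hx'

lemma pvFold_empty_iff (w : List String) :
    w.foldl pvStep (pvPieces ++ pvPieces) = [] ↔ ∀ c ∈ pvPieces, 2 ≤ w.count c := by
  constructor
  · intro h c hc
    have := pvFold_count w (pvPieces ++ pvPieces) c
    rw [h] at this
    simp only [List.count_nil] at this
    have h2 : (pvPieces ++ pvPieces).count c = 2 := by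
      fin_cases hc <;> decide
    omega
  · intro h
    by_contra hne
    rcases List.exists_mem_of_ne_nil _ hne with ⟨x, hx⟩
    have hxp : x ∈ pvPieces ++ pvPieces := pvFold_subset _ _ _ hx
    have hxp' : x ∈ pvPieces := by
      rcases List.mem_append.mp hxp with h' | h' <;> exact h'
    have h2 : (pvPieces ++ pvPieces).count x = 2 := by
      fin_cases hxp' <;> decide
    have hcnt := pvFold_count w (pvPieces ++ pvPieces) x
    have hpos : 0 < (w.foldl pvStep (pvPieces ++ pvPieces)).count x :=
      List.count_pos_iff.mpr hx
    have := h x hxp'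
    omega

lemma pvAlt_all_iff (w : List String) :
    ((pvPieces.map (fun c => (c, max 0 (2 - (PySem.List.count w c : Int))))).all
        (fun p => p.2 == 0)) = true ↔ ∀ c ∈ pvPieces, 2 ≤ w.count c := by
  simp only [List.all_eq_true, List.mem_map]
  constructor
  · intro h c hc
    have := h (c, max 0 (2 - (PySem.List.count w c : Int))) ⟨c, hc, rfl⟩
    simp only [beq_iff_eq, PySem.List.count] at this
    omega
  · intro h p hp
    rcases hp with ⟨c, hc, rfl⟩
    have := h c hc
    simp only [beq_iff_eq, PySem.List.count]
    omega

-- ===== VERDICT (by name: the statement is the Claim_ definition above) =====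
theorem seamless_bag2_pure_spec : Claim_equal_seamless_bag2_pure := by
  intro history _
  unfold Spec_seamless_bag2_pure seamless_bag2_pure seamless_bag2_pure_alt
  set w := PySem.List.slice history (some (-14)) none with hw
  simp only []
  have hstep : (fun bag c => if c ∈ bag then (PySem.List.remove? bag c).getD bag else bag)
      = pvStep := by
    funext bag c; rfl
  rw [hstep]
  by_cases hempty : w.foldl pvStep (pvPieces ++ pvPieces) = []
  · rw [if_pos hempty,
      if_pos ((pvAlt_all_iff w).mpr ((pvFold_empty_iff w).mp hempty))]
    decide
  · rw [if_neg hempty]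
    rw [if_neg (by
      intro hall
      exact hempty ((pvFold_empty_iff w).mpr ((pvAlt_all_iff w).mp hall)))]
    refine List.map_congr_left ?_
    intro c hc
    have h2 : (pvPieces ++ pvPieces).count c = 2 := by
      fin_cases hc <;> decide
    have hcnt := pvFold_count w (pvPieces ++ pvPieces) c
    simp only [PySem.List.count] at *
    have : (w.foldl pvStep (pvPieces ++ pvPieces)).count c = 2 - w.count c := by
      omega
    rw [this]
    congr 1
    omega
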